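-- pv_equiv track=rewrite | github.com/ladokp/aoc2021 | solution/aoc_day_19.py | get_pt
-- ===== SOURCE A (Python) =====
-- def get_pt(facing, d, rots, pt):
--     da, db, dc = pt
--     if facing == "x":
--         main, off_a, off_b = da, db, dc
--     elif facing == "y":
--         main, off_a, off_b = db, dc, da
--     elif facing == "z":
--         main, off_a, off_b = dc, da, db
--
--     if d == -1:
--         off_a, off_b = off_b, off_a
--
--     for _ in range(rots):
--         off_a, off_b = off_b, -off_a
--
--     return d * main, off_a, off_b
-- ===== SOURCE B (Python) =====
-- def get_pt(facing, d, rots, pt):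
--     i = {"x": 0, "y": 1, "z": 2}[facing]
--     main, off_a, off_b = pt[i], pt[(i + 1) % 3], pt[(i + 2) % 3]
--     if d == -1:
--         off_a, off_b = off_b, off_a
--     # quarter-turns are periodic with period 4; negative rots means no turn
--     n = rots % 4 if rots > 0 else 0
--     sa, sb = ((1, 1), (1, -1), (-1, -1), (-1, 1))[n]
--     if n % 2:
--         off_a, off_b = off_b, off_a
--     return d * main, sa * off_a, sb * off_b
-- ===== Notes on version B (the rewrite author's own statement) =====
-- stated objective: faster
-- what changed: Replaces the rots-iteration rotation loop with a closed-form selection on rots % 4 (periodicity of the quarter-turn), keeping the facing dispatch and d==-1 swap.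
import Mathlib
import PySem

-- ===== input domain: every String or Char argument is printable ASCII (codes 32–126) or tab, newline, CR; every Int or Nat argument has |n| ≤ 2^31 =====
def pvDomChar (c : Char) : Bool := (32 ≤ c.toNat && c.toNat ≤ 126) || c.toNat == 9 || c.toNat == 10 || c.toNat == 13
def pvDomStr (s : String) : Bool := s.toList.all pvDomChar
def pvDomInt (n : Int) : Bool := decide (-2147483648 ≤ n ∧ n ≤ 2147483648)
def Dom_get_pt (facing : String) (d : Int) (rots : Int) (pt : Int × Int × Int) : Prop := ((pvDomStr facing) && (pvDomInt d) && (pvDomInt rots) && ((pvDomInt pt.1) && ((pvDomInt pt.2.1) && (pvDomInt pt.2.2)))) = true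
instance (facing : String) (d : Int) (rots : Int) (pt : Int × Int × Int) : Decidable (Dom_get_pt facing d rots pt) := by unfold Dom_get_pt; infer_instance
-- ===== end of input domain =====

-- B replaces A's rots-step rotation loop by a closed-form case split on rots % 4 (quarter-turn periodicity).


-- ===== PORT A =====
-- Literal transliteration of A. Outside Pre_ (facing not "x"/"y"/"z") Python raises
-- UnboundLocalError; the port returns (0, 0, 0) there and nothing is claimed there.
def get_pt (facing : String) (d : Int) (rots : Int) (pt : Int × Int × Int) : Int × Int × Int :=
  let da := pt.1; let db := pt.2.1; let dc := pt.2.2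
  let mab : Int × Int × Int :=
    if facing = "x" then (da, db, dc)
    else if facing = "y" then (db, dc, da)
    else if facing = "z" then (dc, da, db)
    else (0, 0, 0)
  let main := mab.1
  let ob : Int × Int :=
    if d = -1 then (mab.2.2, mab.2.1) else (mab.2.1, mab.2.2)
  let ob := (List.range rots.toNat).foldl (fun p _ => (p.2, -p.1)) ob
  (d * main, ob.1, ob.2)

-- ===== PORT B =====
-- tuple indexing pt[j] for j in {0,1,2} (the only indices B's arithmetic produces); exact there
def pyTriGet (pt : Int × Int × Int) (j : Int) : Int :=
  if j = 0 then pt.1 else if j = 1 then pt.2.1 else pt.2.2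

-- Transliteration of Source B: dict-based axis index, closed-form rotation via rots % 4,
-- sign table + parity swap. Python raises KeyError outside Pre_; the port uses .getD 0 there.
def get_pt_alt (facing : String) (d : Int) (rots : Int) (pt : Int × Int × Int) : Int × Int × Int :=
  let i : Int := ((PySem.Dict.ofList [("x", (0 : Int)), ("y", 1), ("z", 2)]).get? facing).getD 0
  let main := pyTriGet pt i
  let off_a := pyTriGet pt (PySem.Int.mod (i + 1) 3)
  let off_b := pyTriGet pt (PySem.Int.mod (i + 2) 3)
  let ob : Int × Int := if d = -1 then (off_b, off_a) else (off_a, off_b)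
  let n : Int := if rots > 0 then PySem.Int.mod rots 4 else 0
  let s : Int × Int :=
    (PySem.List.pyGet? [((1 : Int), (1 : Int)), (1, -1), (-1, -1), (-1, 1)] n).getD (0, 0)
  let ob : Int × Int := if ¬ PySem.Int.mod n 2 = 0 then (ob.2, ob.1) else ob
  (d * main, s.1 * ob.1, s.2 * ob.2)

-- ===== PRECONDITION & SPEC =====
-- Pre_ excludes facings other than "x"/"y"/"z", on which A (and B) raise UnboundLocalError.
def Pre_get_pt (facing : String) (d : Int) (rots : Int) (pt : Int × Int × Int) : Prop :=
  facing = "x" ∨ facing = "y" ∨ facing = "z"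
instance (facing : String) (d : Int) (rots : Int) (pt : Int × Int × Int) : Decidable (Pre_get_pt facing d rots pt) := by unfold Pre_get_pt; infer_instance
def pvWitness_get_pt : String × Int × Int × (Int × Int × Int) := ("y", -1, 7, (3, -4, 5))

def Spec_get_pt (facing : String) (d : Int) (rots : Int) (pt : Int × Int × Int) (out : Int × Int × Int) : Prop := out = get_pt_alt facing d rots pt
instance (facing : String) (d : Int) (rots : Int) (pt : Int × Int × Int) (out : Int × Int × Int) : Decidable (Spec_get_pt facing d rots pt out) := by unfold Spec_get_pt; infer_instance

-- ===== CLAIM (what is proved, stated in full; the proofs are below) =====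
def Claim_equal_get_pt : Prop := ∀ (facing : String) (d : Int) (rots : Int) (pt : Int × Int × Int), Dom_get_pt facing d rots pt → Pre_get_pt facing d rots pt → Spec_get_pt facing d rots pt (get_pt facing d rots pt)

-- ===== LEMMAS AND PROOFS =====

-- the loop body, as iteration count
lemma rot_foldl_iterate (k : Nat) (p : Int × Int) :
    (List.range k).foldl (fun p _ => (p.2, -p.1)) p
      = (fun q : Int × Int => (q.2, -q.1))^[k] p := by
  induction k with
  | zero => simp
  | succ m ih =>
      rw [List.range_succ, List.foldl_append, ih, Function.iterate_succ_apply']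
      simp

lemma rot_iterate_four (p : Int × Int) :
    (fun q : Int × Int => (q.2, -q.1))^[4] p = p := by
  simp [Function.iterate_succ, Function.comp]

lemma rot_iterate_mod : ∀ (k : Nat) (p : Int × Int),
    (fun q : Int × Int => (q.2, -q.1))^[k] p
      = (fun q : Int × Int => (q.2, -q.1))^[k % 4] p := by
  intro k
  induction k using Nat.strong_induction_on with
  | _ k ih =>
    intro p
    by_cases h : k < 4
    · rw [Nat.mod_eq_of_lt h]
    · obtain ⟨m, rfl⟩ : ∃ m, k = m + 4 := ⟨k - 4, by omega⟩
      have : (fun q : Int × Int => (q.2, -q.1))^[m + 4] p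
          = (fun q : Int × Int => (q.2, -q.1))^[m] p := by
        rw [Function.iterate_add_apply, rot_iterate_four]
      rw [this, ih m (by omega) p, Nat.add_mod_right]

lemma rot_closed (k : Nat) (p : Int × Int) :
    (List.range k).foldl (fun p _ => (p.2, -p.1)) p
      = (if (k % 4 : Nat) = 1 then (p.2, -p.1)
         else if k % 4 = 2 then (-p.1, -p.2)
         else if k % 4 = 3 then (-p.2, p.1)
         else p) := by
  rw [rot_foldl_iterate, rot_iterate_mod]
  have h4 : k % 4 < 4 := Nat.mod_lt _ (by norm_num)
  have : k % 4 = 0 ∨ k % 4 = 1 ∨ k % 4 = 2 ∨ k % 4 = 3 := by omega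
  rcases this with h | h | h | h <;> rw [h] <;>
    simp [Function.iterate_succ, Function.comp]

-- ===== VERDICT (by name: the statement is the Claim_ definition above) =====
theorem get_pt_spec : Claim_equal_get_pt := by
  have hx : (((PySem.Dict.ofList [("x", (0 : Int)), ("y", 1), ("z", 2)]).get? "x").getD 0) = 0 := by decide
  have hy : (((PySem.Dict.ofList [("x", (0 : Int)), ("y", 1), ("z", 2)]).get? "y").getD 0) = 1 := by decide
  have hz : (((PySem.Dict.ofList [("x", (0 : Int)), ("y", 1), ("z", 2)]).get? "z").getD 0) = 2 := by decide
  intro facing d rots pt _ hpre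
  unfold Spec_get_pt get_pt get_pt_alt
  rcases hpre with rfl | rfl | rfl <;>
  · simp only [rot_closed, hx, hy, hz]
    by_cases h : rots > 0
    · rcases (by omega : rots.toNat % 4 = 0 ∨ rots.toNat % 4 = 1 ∨ rots.toNat % 4 = 2 ∨
          rots.toNat % 4 = 3) with h4 | h4 | h4 | h4
      · have hn : rots % 4 = 0 := by omega
        by_cases hd : d = -1 <;> simp [h, hd, h4, hn, pyTriGet]
      · have hn : rots % 4 = 1 := by omega
        by_cases hd : d = -1 <;> simp [h, hd, h4, hn, pyTriGet]
      · have hn : rots % 4 = 2 := by omega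
        by_cases hd : d = -1 <;> simp [h, hd, h4, hn, pyTriGet]
      · have hn : rots % 4 = 3 := by omega
        by_cases hd : d = -1 <;> simp [h, hd, h4, hn, pyTriGet]
    · have h0 : rots.toNat = 0 := by omega
      by_cases hd : d = -1 <;> simp [h, h0, hd, pyTriGet]
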